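-- pv_equiv track=rewrite | github.com/Mithil-Dudam/Data-Structures | app/services/heap.py | heapify
-- ===== SOURCE A (Python) =====
-- def heapify(nums):
--     temp = nums.copy()
--
--     parent = (len(nums) - 2) // 2
--     for i in range(parent, -1, -1):
--         index = i
--         while index < len(nums):
--             left = 2 * index + 1
--             right = 2 * index + 2
--             largest = index
--             if left < len(nums) and nums[largest] < nums[left]:
--                 largest = left
--             if right < len(nums) and nums[largest] < nums[right]:
--                 largest = right
--             if largest == index:
--                 break
--             nums[index], nums[largest] = nums[largest], nums[index]
--             index = largest
--
--     parent = (len(temp) - 2) // 2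
--     for i in range(parent, -1, -1):
--         index = i
--         while index < len(temp):
--             left = 2 * index + 1
--             right = 2 * index + 2
--             smallest = index
--             if left < len(temp) and temp[smallest] > temp[left]:
--                 smallest = left
--             if right < len(temp) and temp[smallest] > temp[right]:
--                 smallest = right
--             if smallest == index:
--                 break
--             temp[index], temp[smallest] = temp[smallest], temp[index]
--             index = smallest
--
--     return (nums, temp)
-- ===== SOURCE B (Python) =====
-- def heapify(nums):
--     # One recursive sift-down routine parametrized by the comparison;
--     # heapifies nums in place (max-heap) and a copy temp (min-heap) in one fused loop.
--     def sift(arr, n, i, better):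
--         left = 2 * i + 1
--         right = 2 * i + 2
--         best = i
--         if left < n and better(arr[left], arr[best]):
--             best = left
--         if right < n and better(arr[right], arr[best]):
--             best = right
--         if best != i:
--             arr[i], arr[best] = arr[best], arr[i]
--             sift(arr, n, best, better)
--
--     temp = nums.copy()
--     n = len(nums)
--     for i in range((n - 2) // 2, -1, -1):
--         sift(nums, n, i, lambda x, y: x > y)
--         sift(temp, n, i, lambda x, y: x < y)
--     return (nums, temp)
-- ===== Notes on version B (the rewrite author's own statement) =====
-- stated objective: simpler
-- what changed: Replaces A's two duplicated iterative while-loop sift-down passes by one recursive sift helper parametrized by the comparison, building the max-heap and the min-heap in a single fused loop.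
import Mathlib
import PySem

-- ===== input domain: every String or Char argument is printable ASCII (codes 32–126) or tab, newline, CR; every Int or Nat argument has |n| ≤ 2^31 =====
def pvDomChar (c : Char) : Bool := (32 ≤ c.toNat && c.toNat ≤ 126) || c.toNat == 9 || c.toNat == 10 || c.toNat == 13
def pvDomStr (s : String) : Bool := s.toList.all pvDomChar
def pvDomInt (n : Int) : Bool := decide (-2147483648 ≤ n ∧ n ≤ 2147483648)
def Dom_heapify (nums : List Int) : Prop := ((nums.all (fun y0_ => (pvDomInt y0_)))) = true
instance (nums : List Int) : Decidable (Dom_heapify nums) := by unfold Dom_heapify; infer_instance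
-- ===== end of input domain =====

-- B replaces A's two duplicated iterative while-loop heapify passes by ONE recursive
-- sift-down helper parametrized by the comparison, run for both heaps in a single fused
-- loop (objective: simpler). Python A and B mutate `nums` in place identically; the
-- equivalence proved here is about the return value.

-- ===== PORT A =====
-- arr[i]: every access in A is guarded (index < len), so pyGetD's default is never used
def hpGet (arr : List Int) (i : Int) : Int := PySem.List.pyGetD arr i 0
-- `xs[i], xs[j] = xs[j], xs[i]`: read both, then assign (exact for the in-range indices used here)
def hpSwap (arr : List Int) (i j : Int) : List Int :=
  PySem.List.pySetD (PySem.List.pySetD arr i (hpGet arr j)) j (hpGet arr i)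

-- A's inner `while index < len(nums)` loop of the max-heap pass; fuel `len+1` is enough
-- because `index` strictly increases each iteration and the loop stops once `index ≥ len`.
def heapify_maxLoop (arr : List Int) (index : Int) : Nat → List Int
  | 0 => arr
  | fuel + 1 =>
    if index < (arr.length : Int) then
      let left := 2 * index + 1
      let right := 2 * index + 2
      let largest1 := if left < (arr.length : Int) ∧ hpGet arr index < hpGet arr left then left else index
      let largest2 := if right < (arr.length : Int) ∧ hpGet arr largest1 < hpGet arr right then right else largest1
      if largest2 = index then arr
      else heapify_maxLoop (hpSwap arr index largest2) largest2 fuel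
    else arr

-- A's inner while loop of the min-heap pass over `temp`
def heapify_minLoop (arr : List Int) (index : Int) : Nat → List Int
  | 0 => arr
  | fuel + 1 =>
    if index < (arr.length : Int) then
      let left := 2 * index + 1
      let right := 2 * index + 2
      let smallest1 := if left < (arr.length : Int) ∧ hpGet arr index > hpGet arr left then left else index
      let smallest2 := if right < (arr.length : Int) ∧ hpGet arr smallest1 > hpGet arr right then right else smallest1
      if smallest2 = index then arr
      else heapify_minLoop (hpSwap arr index smallest2) smallest2 fuel
    else arr

def heapify (nums : List Int) : List Int × List Int :=
  let temp := nums
  let nums2 := (PySem.List.pyRange (PySem.Int.floordiv ((nums.length : Int) - 2) 2) (-1) (-1)).foldl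
      (fun arr i => heapify_maxLoop arr i (arr.length + 1)) nums
  let temp2 := (PySem.List.pyRange (PySem.Int.floordiv ((temp.length : Int) - 2) 2) (-1) (-1)).foldl
      (fun arr i => heapify_minLoop arr i (arr.length + 1)) temp
  (nums2, temp2)

-- ===== PORT B =====
-- B's recursive sift(arr, n, i, better); fuel `n+1` covers the recursion depth, since each
-- recursive call moves to a strictly larger index `best < n`.
def heapify_sift (better : Int → Int → Bool) (n : Int) (arr : List Int) (i : Int) : Nat → List Int
  | 0 => arr
  | fuel + 1 =>
    let left := 2 * i + 1
    let right := 2 * i + 2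
    let best1 := if left < n ∧ better (hpGet arr left) (hpGet arr i) then left else i
    let best2 := if right < n ∧ better (hpGet arr right) (hpGet arr best1) then right else best1
    if best2 ≠ i then heapify_sift better n (hpSwap arr i best2) best2 fuel
    else arr

def heapify_alt (nums : List Int) : List Int × List Int :=
  let temp := nums
  let n : Int := nums.length
  (PySem.List.pyRange (PySem.Int.floordiv (n - 2) 2) (-1) (-1)).foldl
    (fun (st : List Int × List Int) i =>
      (heapify_sift (fun x y => decide (x > y)) n st.1 i (n.toNat + 1),
       heapify_sift (fun x y => decide (x < y)) n st.2 i (n.toNat + 1)))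
    (nums, temp)

-- ===== PRECONDITION & SPEC =====
def Spec_heapify (nums : List Int) (out : List Int × List Int) : Prop := out = heapify_alt nums
instance (nums : List Int) (out : List Int × List Int) : Decidable (Spec_heapify nums out) := by unfold Spec_heapify; infer_instance

-- ===== CLAIM (what is proved, stated in full; the proofs are below) =====
def Claim_equal_heapify : Prop := ∀ (nums : List Int), Dom_heapify nums → Spec_heapify nums (heapify nums)

-- ===== LEMMAS AND PROOFS =====

theorem hpSwap_length (arr : List Int) (i j : Int) : (hpSwap arr i j).length = arr.length := by
  simp [hpSwap, PySem.List.length_pySetD]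

theorem maxLoop_length (fuel : Nat) : ∀ (arr : List Int) (i : Int),
    (heapify_maxLoop arr i fuel).length = arr.length := by
  induction fuel with
  | zero => intro arr i; rfl
  | succ fuel ih =>
    intro arr i
    simp only [heapify_maxLoop]
    repeat' split
    all_goals first | rfl | rw [ih, hpSwap_length]

theorem minLoop_length (fuel : Nat) : ∀ (arr : List Int) (i : Int),
    (heapify_minLoop arr i fuel).length = arr.length := by
  induction fuel with
  | zero => intro arr i; rfl
  | succ fuel ih =>
    intro arr i
    simp only [heapify_minLoop]
    repeat' split
    all_goals first | rfl | rw [ih, hpSwap_length]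

theorem sift_eq_maxLoop (fuel : Nat) : ∀ (arr : List Int) (i : Int), 0 ≤ i →
    heapify_maxLoop arr i fuel =
      heapify_sift (fun x y => decide (x > y)) (arr.length : Int) arr i fuel := by
  induction fuel with
  | zero => intro arr i _; rfl
  | succ fuel ih =>
    intro arr i hi
    rw [heapify_maxLoop, heapify_sift]
    simp only [decide_eq_true_eq, gt_iff_lt, ne_eq, ite_not]
    by_cases hlt : i < (arr.length : Int)
    · rw [if_pos hlt]
      set L1 := if 2 * i + 1 < (arr.length : Int) ∧ hpGet arr i < hpGet arr (2 * i + 1)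
        then 2 * i + 1 else i with hL1
      set L2 := if 2 * i + 2 < (arr.length : Int) ∧ hpGet arr L1 < hpGet arr (2 * i + 2)
        then 2 * i + 2 else L1 with hL2
      by_cases heq : L2 = i
      · rw [if_pos heq, if_pos heq]
      · rw [if_neg heq, if_neg heq]
        have h0 : (0:Int) ≤ L2 := by
          rw [hL2, hL1]; split_ifs <;> omega
        rw [ih _ L2 h0, hpSwap_length]
    · rw [if_neg hlt]
      have h1 : ¬ (2 * i + 1 < (arr.length : Int) ∧ hpGet arr i < hpGet arr (2 * i + 1)) := by
        rintro ⟨h, -⟩; omega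
      rw [if_neg h1]
      have h2 : ¬ (2 * i + 2 < (arr.length : Int) ∧ hpGet arr i < hpGet arr (2 * i + 2)) := by
        rintro ⟨h, -⟩; omega
      rw [if_neg h2, if_pos rfl]

theorem sift_eq_minLoop (fuel : Nat) : ∀ (arr : List Int) (i : Int), 0 ≤ i →
    heapify_minLoop arr i fuel =
      heapify_sift (fun x y => decide (x < y)) (arr.length : Int) arr i fuel := by
  induction fuel with
  | zero => intro arr i _; rfl
  | succ fuel ih =>
    intro arr i hi
    rw [heapify_minLoop, heapify_sift]
    simp only [decide_eq_true_eq, gt_iff_lt, ne_eq, ite_not]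
    by_cases hlt : i < (arr.length : Int)
    · rw [if_pos hlt]
      set L1 := if 2 * i + 1 < (arr.length : Int) ∧ hpGet arr (2 * i + 1) < hpGet arr i
        then 2 * i + 1 else i with hL1
      set L2 := if 2 * i + 2 < (arr.length : Int) ∧ hpGet arr (2 * i + 2) < hpGet arr L1
        then 2 * i + 2 else L1 with hL2
      by_cases heq : L2 = i
      · rw [if_pos heq, if_pos heq]
      · rw [if_neg heq, if_neg heq]
        have h0 : (0:Int) ≤ L2 := by
          rw [hL2, hL1]; split_ifs <;> omega
        rw [ih _ L2 h0, hpSwap_length]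
    · rw [if_neg hlt]
      have h1 : ¬ (2 * i + 1 < (arr.length : Int) ∧ hpGet arr (2 * i + 1) < hpGet arr i) := by
        rintro ⟨h, -⟩; omega
      rw [if_neg h1]
      have h2 : ¬ (2 * i + 2 < (arr.length : Int) ∧ hpGet arr (2 * i + 2) < hpGet arr i) := by
        rintro ⟨h, -⟩; omega
      rw [if_neg h2, if_pos rfl]

-- foldl congruence with a loop invariant (needed because A's step reads the CURRENT length
-- while B's step uses the length fixed before the loop)
theorem foldl_congr_inv {α β : Type} (P : α → Prop) (f g : α → β → α)
    (l : List β) : ∀ (a : α), P a → (∀ x, ∀ b ∈ l, P x → P (f x b)) →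
    (∀ x, ∀ b ∈ l, P x → f x b = g x b) → l.foldl f a = l.foldl g a := by
  induction l with
  | nil => intro a _ _ _; rfl
  | cons b l ih =>
    intro a ha hpres heq
    simp only [List.foldl_cons]
    rw [heq a b (List.mem_cons_self) ha]
    exact ih (g a b) (heq a b List.mem_cons_self ha ▸ hpres a b List.mem_cons_self ha)
      (fun x c hc => hpres x c (List.mem_cons_of_mem _ hc))
      (fun x c hc => heq x c (List.mem_cons_of_mem _ hc))

-- ===== VERDICT (by name: the statement is the Claim_ definition above) =====
theorem heapify_spec : Claim_equal_heapify := by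
  intro nums _
  unfold Spec_heapify
  simp only [heapify, heapify_alt]
  rw [PySem.List.foldl_prod_mk
    (fun a i => heapify_sift (fun x y => decide (x > y)) ((nums.length : Int)) a i
      (((nums.length : Int)).toNat + 1))
    (fun a i => heapify_sift (fun x y => decide (x < y)) ((nums.length : Int)) a i
      (((nums.length : Int)).toNat + 1))]
  set rng := PySem.List.pyRange (PySem.Int.floordiv ((nums.length : Int) - 2) 2) (-1) (-1) with hrng
  have hmem : ∀ i ∈ rng, (0:Int) ≤ i := by
    intro i hi
    rw [hrng, PySem.List.mem_pyRange_neg_one] at hi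
    omega
  refine Prod.ext ?_ ?_ <;> simp only
  · apply foldl_congr_inv (fun arr => arr.length = nums.length)
    · rfl
    · intro x b _ hx; rw [maxLoop_length, hx]
    · intro arr i hi hlen
      rw [sift_eq_maxLoop _ arr i (hmem i hi), hlen]
      simp
  · apply foldl_congr_inv (fun arr => arr.length = nums.length)
    · rfl
    · intro x b _ hx; rw [minLoop_length, hx]
    · intro arr i hi hlen
      rw [sift_eq_minLoop _ arr i (hmem i hi), hlen]
      simp
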